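-- pv_equiv track=rewrite | github.com/wxin10/webguard | backend/app/services/threat_intel_parser.py | _strip_adblock_suffix
-- ===== SOURCE A (Python) =====
-- def _strip_adblock_suffix(value: str) -> str:
--     candidate = value
--     if candidate.startswith("||"):
--         candidate = candidate[2:]
--     for separator in ("^", "$"):
--         if separator in candidate:
--             candidate = candidate.split(separator, 1)[0]
--     return candidate
-- ===== SOURCE B (Python) =====
-- def _strip_adblock_suffix(value: str) -> str:
--     candidate = value[2:] if value.startswith("||") else value
--     cut = next((i for i, ch in enumerate(candidate) if ch in "^$"), len(candidate))
--     return candidate[:cut]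
-- ===== Notes on version B (the rewrite author's own statement) =====
-- stated objective: idiomatic
-- what changed: Replaces the loop over two separators with two conditional split passes by a single left-to-right scan that finds the earliest '^' or '$' and slices once.
import Mathlib
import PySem

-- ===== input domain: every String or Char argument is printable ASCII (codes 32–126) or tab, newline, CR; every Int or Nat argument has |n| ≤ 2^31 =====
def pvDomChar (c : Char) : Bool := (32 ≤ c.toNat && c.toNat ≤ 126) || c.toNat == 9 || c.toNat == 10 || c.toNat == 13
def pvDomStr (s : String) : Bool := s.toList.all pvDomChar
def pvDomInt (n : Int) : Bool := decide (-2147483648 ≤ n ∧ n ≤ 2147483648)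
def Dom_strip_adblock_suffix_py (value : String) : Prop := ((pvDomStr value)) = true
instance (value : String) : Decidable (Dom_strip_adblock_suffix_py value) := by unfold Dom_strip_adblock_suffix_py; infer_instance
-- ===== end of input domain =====

-- B replaces A's two sequential conditional split passes by a single scan for the earliest '^' or '$' (idiomatic; same cost).


-- ===== PORT A =====
-- candidate.split(sep, 1)[0]: split always yields a nonempty list, so [0] is headD
def strip_adblock_suffix_py (value : String) : String :=
  let c0 := value.toList
  let c1 := if PySem.Chars.startswith c0 ['|', '|'] then PySem.List.slice c0 (some 2) none else c0
  let c2 := List.foldl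
    (fun cand sep =>
      if PySem.Chars.isIn [sep] cand then (PySem.Chars.splitOnMax cand [sep] 1).headD []
      else cand)
    c1 ['^', '$']
  String.ofList c2

-- ===== PORT B =====
-- next((i for i, ch in enumerate(candidate) if ch in "^$"), len(candidate)): scan for the first hit
def pvCutIdx (cs : List Char) : Nat :=
  match cs with
  | [] => 0
  | c :: rest => if c = '^' ∨ c = '$' then 0 else pvCutIdx rest + 1

def strip_adblock_suffix_py_alt (value : String) : String :=
  let candidate := if PySem.Chars.startswith value.toList ['|', '|'] then PySem.List.slice value.toList (some 2) none else value.toList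
  let cut := pvCutIdx candidate
  String.ofList (PySem.List.slice candidate none (some (cut : Int)))

-- ===== PRECONDITION & SPEC =====
def Spec_strip_adblock_suffix_py (value : String) (out : String) : Prop := out = strip_adblock_suffix_py_alt value
instance (value : String) (out : String) : Decidable (Spec_strip_adblock_suffix_py value out) := by unfold Spec_strip_adblock_suffix_py; infer_instance

-- ===== CLAIM (what is proved, stated in full; the proofs are below) =====
def Claim_equal_strip_adblock_suffix_py : Prop := ∀ (value : String), Dom_strip_adblock_suffix_py value → Spec_strip_adblock_suffix_py value (strip_adblock_suffix_py value)

-- ===== LEMMAS AND PROOFS =====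

-- splitOnMax.go with maxsplit 0 flushes the current piece plus the rest
lemma pv_go_zero (a : Char) (fuel : Nat) (s cur : List Char) (acc : List (List Char)) :
    PySem.Chars.splitOnMax.go [a] fuel 0 s cur acc = ((cur.reverse ++ s) :: acc).reverse := by
  cases fuel with
  | zero => simp [PySem.Chars.splitOnMax.go]
  | succ f => cases s with
    | nil => simp [PySem.Chars.splitOnMax.go]
    | cons c rest => simp [PySem.Chars.splitOnMax.go]

-- splitOnMax.go with maxsplit 1 and a one-char separator: one cut at the first occurrence
lemma pv_go_one (a : Char) (s : List Char) : ∀ (fuel : Nat) (cur : List Char) (acc : List (List Char)),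
    s.length < fuel →
    PySem.Chars.splitOnMax.go [a] fuel 1 s cur acc =
      ((cur.reverse ++ s.takeWhile (· ≠ a)) :: acc).reverse ++
        (if a ∈ s then [(s.dropWhile (· ≠ a)).tail] else []) := by
  induction s with
  | nil =>
    intro fuel cur acc h
    cases fuel with
    | zero => omega
    | succ f => simp [PySem.Chars.splitOnMax.go]
  | cons c rest ih =>
    intro fuel cur acc h
    cases fuel with
    | zero => omega
    | succ f =>
      by_cases hc : c = a
      · subst hc
        have hpre : List.isPrefixOf [c] (c :: rest) = true := by
          simp [List.isPrefixOf]
        simp only [PySem.Chars.splitOnMax.go, hpre, if_pos]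
        rw [pv_go_zero]
        simp [List.takeWhile, List.dropWhile]
      · have hpre : List.isPrefixOf [a] (c :: rest) = false := by
          simp [List.isPrefixOf]; exact fun h => absurd h.symm hc
        simp only [PySem.Chars.splitOnMax.go, hpre]
        rw [if_neg (by simp), ih f (c :: cur) acc (by simpa using Nat.lt_of_succ_lt_succ h)]
        simp [List.takeWhile, List.dropWhile, hc, Ne.symm hc]

-- head of candidate.split(sep, 1) is the prefix before the first sep
lemma pv_split_head (a : Char) (s : List Char) :
    (PySem.Chars.splitOnMax s [a] 1).headD [] = s.takeWhile (· ≠ a) := by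
  unfold PySem.Chars.splitOnMax
  rw [if_neg (by norm_num), show (1 : Int).toNat = 1 from rfl]
  rw [pv_go_one a s (s.length + 1) [] [] (by omega)]
  by_cases h : a ∈ s <;> simp [h]

-- one pass of A's loop body is a takeWhile (also when sep is absent)
lemma pv_step (a : Char) (s : List Char) :
    (if PySem.Chars.isIn [a] s then (PySem.Chars.splitOnMax s [a] 1).headD [] else s)
      = s.takeWhile (· ≠ a) := by
  by_cases h : PySem.Chars.isIn [a] s
  · rw [if_pos h, pv_split_head]
  · have hmem : a ∉ s := by
      intro hm
      exact h ((PySem.Chars.isIn_iff_infix _ _).mpr ((List.singleton_infix_iff a s).mpr hm))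
    rw [if_neg h, List.takeWhile_eq_self_iff.mpr]
    intro x hx; simp; intro hxa; exact hmem (hxa ▸ hx)

-- B's single scan cuts where A's two takeWhile passes end up
lemma pv_cut (s : List Char) :
    ((s.takeWhile (· ≠ '^')).takeWhile (· ≠ '$')) = s.take (pvCutIdx s) := by
  induction s with
  | nil => simp [pvCutIdx]
  | cons c rest ih =>
    by_cases h : c = '^' ∨ c = '$'
    · rcases h with h | h <;> subst h <;> simp [pvCutIdx, List.takeWhile]
    · push Not at h
      rw [pvCutIdx, if_neg (not_or.mpr h),
        List.takeWhile_cons_of_pos (by simp [h.1]),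
        List.takeWhile_cons_of_pos (by simp [h.2]),
        List.take_succ_cons]
      exact congrArg (c :: ·) ih

-- ===== VERDICT (by name: the statement is the Claim_ definition above) =====
theorem strip_adblock_suffix_py_spec : Claim_equal_strip_adblock_suffix_py := by
  intro value _
  unfold Spec_strip_adblock_suffix_py strip_adblock_suffix_py strip_adblock_suffix_py_alt
  simp only [List.foldl]
  rw [pv_step, pv_step, pv_cut, PySem.List.slice_to_natCast]
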